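-- pv_equiv track=rewrite | github.com/DABychkov/VKR_program | gost_validator/services/extractors/notes_footnotes_extractor.py | _near_material_flags
-- ===== SOURCE A (Python) =====
-- def _near_material_flags(
--     paragraph_index: int,
--     figure_caption_indices: set[int],
--     table_caption_indices: set[int],
--     window: int = 2,
-- ) -> tuple[bool, bool]:
--     near_figure = any(abs(paragraph_index - idx) <= window for idx in figure_caption_indices)
--     near_table = any(abs(paragraph_index - idx) <= window for idx in table_caption_indices)
--     return near_figure, near_table
-- ===== SOURCE B (Python) =====
-- def _near_material_flags(
--     paragraph_index: int,
--     figure_caption_indices: set[int],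
--     table_caption_indices: set[int],
--     window: int = 2,
-- ) -> tuple[bool, bool]:
--     # Sort each set once and binary-search for the first index >= paragraph_index - window;
--     # the paragraph is near iff that index exists and is <= paragraph_index + window.
--     def near(indices):
--         xs = sorted(indices)
--         lo, hi = 0, len(xs)
--         target = paragraph_index - window
--         while lo < hi:
--             mid = (lo + hi) // 2
--             if xs[mid] < target:
--                 lo = mid + 1
--             else:
--                 hi = mid
--         return lo < len(xs) and xs[lo] <= paragraph_index + window
--     return near(figure_caption_indices), near(table_caption_indices)
-- ===== Notes on version B (the rewrite author's own statement) =====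
-- stated objective: alternative
-- what changed: Instead of testing every caption index against the window with abs, B sorts each set once and binary-searches for the first index >= paragraph_index - window, then checks it against paragraph_index + window.
import Mathlib
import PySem

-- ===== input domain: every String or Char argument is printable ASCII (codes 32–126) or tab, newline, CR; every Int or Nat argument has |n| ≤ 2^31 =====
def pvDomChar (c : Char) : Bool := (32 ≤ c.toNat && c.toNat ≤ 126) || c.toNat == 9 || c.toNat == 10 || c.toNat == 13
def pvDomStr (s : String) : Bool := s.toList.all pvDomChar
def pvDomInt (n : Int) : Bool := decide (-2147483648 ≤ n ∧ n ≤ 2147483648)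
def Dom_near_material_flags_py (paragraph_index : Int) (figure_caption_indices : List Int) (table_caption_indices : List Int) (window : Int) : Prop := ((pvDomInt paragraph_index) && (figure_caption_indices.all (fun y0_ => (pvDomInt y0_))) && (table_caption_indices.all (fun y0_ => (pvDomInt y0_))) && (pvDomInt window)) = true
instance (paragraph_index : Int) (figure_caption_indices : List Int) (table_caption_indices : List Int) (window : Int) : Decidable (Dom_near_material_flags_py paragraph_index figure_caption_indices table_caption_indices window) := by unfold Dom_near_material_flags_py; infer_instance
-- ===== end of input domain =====

-- ===== PORT A =====
-- B replaces the per-index abs test with sort + binary search for the first index >= paragraph_index - window (objective: alternative).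
def near_material_flags_py (paragraph_index : Int) (figure_caption_indices : List Int) (table_caption_indices : List Int) (window : Int) : Bool × Bool :=
  let near_figure := figure_caption_indices.any (fun idx => decide (|paragraph_index - idx| ≤ window))
  let near_table := table_caption_indices.any (fun idx => decide (|paragraph_index - idx| ≤ window))
  (near_figure, near_table)

-- ===== PORT B =====
-- binary search: first position in xs[lo:hi] whose element is >= target (xs sorted ascending);
-- hand-written while-loop in Source B, ported as structural recursion on hi - lo
-- fuel = hi - lo at the call site bounds the loop's iterations (each step shrinks hi - lo),
-- so this structural recursion computes exactly Source B's while-loop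
def pvBisect (xs : List Int) (target : Int) : Nat → Nat → Nat → Nat
  | 0, lo, _ => lo
  | fuel + 1, lo, hi =>
    if lo < hi then
      let mid := (lo + hi) / 2  -- Python (lo+hi)//2: lo,hi are nonnegative, so Nat division is exact here
      if PySem.List.pyGetD xs (mid : Int) 0 < target then pvBisect xs target fuel (mid + 1) hi
      else pvBisect xs target fuel lo mid
    else lo

def pvNear (paragraph_index window : Int) (indices : List Int) : Bool :=
  let xs := PySem.List.sorted indices (fun x => x) false
  let lo := pvBisect xs (paragraph_index - window) xs.length 0 xs.length
  decide (lo < xs.length) && decide (PySem.List.pyGetD xs (lo : Int) 0 ≤ paragraph_index + window)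

def near_material_flags_py_alt (paragraph_index : Int) (figure_caption_indices : List Int) (table_caption_indices : List Int) (window : Int) : Bool × Bool :=
  (pvNear paragraph_index window figure_caption_indices,
   pvNear paragraph_index window table_caption_indices)

-- ===== PRECONDITION & SPEC =====
def Spec_near_material_flags_py (paragraph_index : Int) (figure_caption_indices : List Int) (table_caption_indices : List Int) (window : Int) (out : Bool × Bool) : Prop := out = near_material_flags_py_alt paragraph_index figure_caption_indices table_caption_indices window
instance (paragraph_index : Int) (figure_caption_indices : List Int) (table_caption_indices : List Int) (window : Int) (out : Bool × Bool) : Decidable (Spec_near_material_flags_py paragraph_index figure_caption_indices table_caption_indices window out) := by unfold Spec_near_material_flags_py; infer_instance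

-- ===== CLAIM (what is proved, stated in full; the proofs are below) =====
def Claim_equal_near_material_flags_py : Prop := ∀ (paragraph_index : Int) (figure_caption_indices : List Int) (table_caption_indices : List Int) (window : Int), Dom_near_material_flags_py paragraph_index figure_caption_indices table_caption_indices window → Spec_near_material_flags_py paragraph_index figure_caption_indices table_caption_indices window (near_material_flags_py paragraph_index figure_caption_indices table_caption_indices window)

-- ===== LEMMAS AND PROOFS =====

theorem pvBisect_spec (xs : List Int) (t : Int) (hs : xs.Pairwise (· ≤ ·)) :
    ∀ (fuel lo hi : Nat), hi - lo ≤ fuel → hi ≤ xs.length →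
    (∀ k, (h : k < xs.length) → k < lo → xs[k] < t) →
    (∀ k, (h : k < xs.length) → hi ≤ k → t ≤ xs[k]) →
    (∀ k, (h : k < xs.length) → k < pvBisect xs t fuel lo hi → xs[k] < t) ∧
    (∀ k, (h : k < xs.length) → pvBisect xs t fuel lo hi ≤ k → t ≤ xs[k]) := by
  intro fuel
  induction fuel with
  | zero =>
    intro lo hi hfuel hhi hlow hhigh
    simp only [pvBisect]
    exact ⟨hlow, fun k hk hlk => hhigh k hk (by omega)⟩
  | succ fuel ih =>
    intro lo hi hfuel hhi hlow hhigh
    rw [pvBisect]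
    by_cases hlt : lo < hi
    · rw [if_pos hlt]
      by_cases hget : PySem.List.pyGetD xs (((lo + hi) / 2 : Nat) : Int) 0 < t
      · rw [if_pos hget]
        have hmidlt : (lo + hi) / 2 < xs.length := by omega
        have hget' : xs[(lo + hi) / 2] < t := by
          have := PySem.List.pyGetD_natCast xs ((lo + hi) / 2) 0
          rw [List.getD_eq_getElem _ _ hmidlt] at this
          omega
        refine ih ((lo + hi) / 2 + 1) hi (by omega) hhi (fun k hk hklt => ?_) hhigh
        have : xs[k] ≤ xs[(lo + hi) / 2] := by
          rcases Nat.lt_or_ge k ((lo + hi) / 2) with h | h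
          · exact List.Pairwise.rel_get_of_lt hs (by simpa using h)
          · have : k = (lo + hi) / 2 := by omega
            subst this; exact le_refl _
        omega
      · rw [if_neg hget]
        have hmidlt : (lo + hi) / 2 < xs.length := by omega
        have hget' : t ≤ xs[(lo + hi) / 2] := by
          have := PySem.List.pyGetD_natCast xs ((lo + hi) / 2) 0
          rw [List.getD_eq_getElem _ _ hmidlt] at this
          omega
        refine ih lo ((lo + hi) / 2) (by omega) (by omega) hlow (fun k hk hmk => ?_)
        have : xs[(lo + hi) / 2] ≤ xs[k] := by
          rcases Nat.lt_or_ge ((lo + hi) / 2) k with h | h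
          · exact List.Pairwise.rel_get_of_lt hs (by simpa using h)
          · have : (lo + hi) / 2 = k := by omega
            subst this; exact le_refl _
        omega
    · rw [if_neg hlt]
      exact ⟨hlow, fun k hk hlk => hhigh k hk (by omega)⟩

-- the scan over the set equals the sort + binary-search probe
theorem any_abs_eq_pvNear (p w : Int) (s : List Int) :
    s.any (fun idx => decide (|p - idx| ≤ w)) = pvNear p w s := by
  unfold pvNear
  set xs := PySem.List.sorted s (fun x => x) false with hxs
  have hperm : ∀ x, x ∈ s ↔ x ∈ xs := by
    intro x; rw [hxs, PySem.List.mem_sorted]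
  have hs : xs.Pairwise (· ≤ ·) := by
    simpa using PySem.List.sorted_pairwise s (fun x => x)
  set r := pvBisect xs (p - w) xs.length 0 xs.length with hr
  obtain ⟨hbelow, habove⟩ := pvBisect_spec xs (p - w) hs xs.length 0 xs.length (by omega) (le_refl _)
    (fun k hk hk0 => absurd hk0 (Nat.not_lt_zero k))
    (fun k hk hk0 => absurd hk (Nat.not_lt.mpr hk0))
  rw [Bool.eq_iff_iff]
  simp only [List.any_eq_true, decide_eq_true_eq, Bool.and_eq_true]
  constructor
  · rintro ⟨idx, hmem, habs⟩
    rw [abs_le] at habs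
    rw [hperm] at hmem
    obtain ⟨k, hk, hkeq⟩ := List.mem_iff_getElem.mp hmem
    have hrk : r ≤ k := by
      by_contra hc
      have := hbelow k hk (Nat.lt_of_not_le hc)
      omega
    have hrlen : r < xs.length := Nat.lt_of_le_of_lt hrk hk
    have hmono : xs[r] ≤ xs[k] := by
      rcases Nat.lt_or_ge r k with h | h
      · exact List.Pairwise.rel_get_of_lt hs (by simpa using h)
      · have : r = k := by omega
        subst this; exact le_refl _
    have hgetd : PySem.List.pyGetD xs (r : Int) 0 = xs[r] := by
      rw [PySem.List.pyGetD_natCast, List.getD_eq_getElem _ _ hrlen]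
    refine ⟨by simpa using hrlen, by rw [hgetd]; omega⟩
  · rintro ⟨hrlen', hle'⟩
    have hrlen : r < xs.length := by simpa using hrlen'
    have hgetd : PySem.List.pyGetD xs (r : Int) 0 = xs[r] := by
      rw [PySem.List.pyGetD_natCast, List.getD_eq_getElem _ _ hrlen]
    rw [hgetd] at hle'
    have hge : p - w ≤ xs[r] := habove r hrlen (le_refl r)
    refine ⟨xs[r], (hperm _).mpr (List.getElem_mem hrlen), ?_⟩
    rw [abs_le]
    omega

-- ===== VERDICT (by name: the statement is the Claim_ definition above) =====
theorem near_material_flags_py_spec : Claim_equal_near_material_flags_py := by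
  intro p f t w _
  unfold Spec_near_material_flags_py near_material_flags_py near_material_flags_py_alt
  simp only [any_abs_eq_pvNear]
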